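-- pv_equiv track=rewrite | github.com/Cjw3740/VECS | VECS.py | last_task
-- ===== SOURCE A (Python) =====
-- def last_task(todo_list,now):
-- 	target_task = []
-- 	for task in todo_list:
-- 		if task[0] < now[0]:
-- 			target_task = task
-- 		elif task[0] > now[0]:
-- 			break
-- 		else:
-- 			if task[1] < now[1]:
-- 				target_task = task
-- 			elif task[1] > now[1]:
-- 				break
-- 			else:
-- 				if task[2] < now[2]:
-- 					target_task = task
-- 	return target_task
-- ===== SOURCE B (Python) =====
-- def last_task(todo_list, now):
--     prefix = []
--     for t in todo_list:
--         if t[:2] > now[:2]: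
--             break
--         prefix.append(t)
--     for t in reversed(prefix):
--         if t[:3] < now[:3]:
--             return t
--     return []
-- ===== Notes on version B (the rewrite author's own statement) =====
-- stated objective: alternative
-- what changed: B replaces A's accumulator scan with nested per-index comparisons by a cut-then-search decomposition: take the prefix of tasks whose first two components do not lexicographically exceed now's (Python list slicing and list comparison), then search that prefix back-to-front and return the first task below now[:3].
import Mathlib
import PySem

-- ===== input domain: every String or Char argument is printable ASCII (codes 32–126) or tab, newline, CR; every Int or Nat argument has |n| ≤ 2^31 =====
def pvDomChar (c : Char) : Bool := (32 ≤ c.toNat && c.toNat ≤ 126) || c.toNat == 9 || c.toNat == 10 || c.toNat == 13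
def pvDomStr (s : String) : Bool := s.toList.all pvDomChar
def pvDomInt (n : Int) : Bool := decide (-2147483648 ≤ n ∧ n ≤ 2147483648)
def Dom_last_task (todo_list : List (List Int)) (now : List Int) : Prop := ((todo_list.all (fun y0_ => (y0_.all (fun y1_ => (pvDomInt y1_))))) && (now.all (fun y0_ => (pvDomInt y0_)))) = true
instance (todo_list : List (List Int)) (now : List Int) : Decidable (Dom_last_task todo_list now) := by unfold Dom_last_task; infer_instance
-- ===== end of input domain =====

-- B is an alternative decomposition of the same O(n) scan: cut the list at the first task whose
-- first-two components exceed `now`'s, then search the kept prefix back-to-front for a task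
-- lexicographically below `now[:3]`, instead of A's accumulator with nested index comparisons.

-- ===== PORT A =====
-- IndexError (task/now too short) is modeled by pyGet? = none; Pre_last_task excludes exactly
-- those inputs, so the `.getD 0` fallback is never taken on admitted inputs.
def lastTaskGo (now : List Int) : List (List Int) → List Int → List Int
  | [], target => target
  | task :: rest, target =>
    let t0 := (PySem.List.pyGet? task 0).getD 0
    let n0 := (PySem.List.pyGet? now 0).getD 0
    if t0 < n0 then lastTaskGo now rest task
    else if t0 > n0 then target
    else
      let t1 := (PySem.List.pyGet? task 1).getD 0
      let n1 := (PySem.List.pyGet? now 1).getD 0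
      if t1 < n1 then lastTaskGo now rest task
      else if t1 > n1 then target
      else
        let t2 := (PySem.List.pyGet? task 2).getD 0
        let n2 := (PySem.List.pyGet? now 2).getD 0
        if t2 < n2 then lastTaskGo now rest task
        else lastTaskGo now rest target

def last_task (todo_list : List (List Int)) (now : List Int) : List Int :=
  lastTaskGo now todo_list []

-- ===== PORT B =====
-- Python's `<` on int lists (lexicographic with the prefix rule); exact.
def pyListLt : List Int → List Int → Bool
  | [], [] => false
  | [], _ :: _ => true
  | _ :: _, [] => false
  | a :: as, b :: bs => if a < b then true else if b < a then false else pyListLt as bs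

-- t[:k] on a list with nonnegative literal k is List.take k; exact.
def last_task_alt (todo_list : List (List Int)) (now : List Int) : List Int :=
  let pre := todo_list.takeWhile (fun t => !pyListLt (now.take 2) (t.take 2))
  match pre.reverse.find? (fun t => pyListLt (t.take 3) (now.take 3)) with
  | some t => t
  | none => []

-- ===== PRECONDITION & SPEC =====
-- A's break test `task[:2] > now[:2]` as a boolean on the raw input (Pre_ helper).
def brkB (now t : List Int) : Bool := pyListLt (now.take 2) (t.take 2)

-- Shape a scanned task must have so that A's nested indexing of it cannot raise:
-- index 0 exists on both sides; index 1 is needed only if the heads are equal; index 2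
-- only if the first two components are equal.
def taskOkB (now t : List Int) : Bool :=
  match t, now with
  | [], _ => false
  | _ :: _, [] => false
  | a :: ts, x :: ns =>
    if a = x then
      match ts, ns with
      | [], _ => false
      | _ :: _, [] => false
      | b :: ts2, y :: ns2 =>
        if b = y then
          match ts2, ns2 with
          | [], _ => false
          | _ :: _, [] => false
          | _ :: _, _ :: _ => true
        else true
    else true

-- Pre_ excludes exactly the inputs on which A raises IndexError: every task the scan actually
-- reaches (no earlier task triggered the break) must have the components A's comparisons read.
def Pre_last_task (todo_list : List (List Int)) (now : List Int) : Prop :=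
  ∀ i, (hi : i < todo_list.length) →
    (∀ j, (hj : j < i) → brkB now (todo_list[j]'(Nat.lt_trans hj hi)) = false) →
    taskOkB now todo_list[i] = true
instance (todo_list : List (List Int)) (now : List Int) : Decidable (Pre_last_task todo_list now) := by
  unfold Pre_last_task; infer_instance
def pvWitness_last_task : List (List Int) × List Int := ([[1, 2, 3], [2, 0, 0]], [2, 1, 5])
def Spec_last_task (todo_list : List (List Int)) (now : List Int) (out : List Int) : Prop := out = last_task_alt todo_list now
instance (todo_list : List (List Int)) (now : List Int) (out : List Int) : Decidable (Spec_last_task todo_list now out) := by unfold Spec_last_task; infer_instance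

-- ===== CLAIM (what is proved, stated in full; the proofs are below) =====
def Claim_equal_last_task : Prop := ∀ (todo_list : List (List Int)) (now : List Int), Dom_last_task todo_list now → Pre_last_task todo_list now → Spec_last_task todo_list now (last_task todo_list now)

-- ===== LEMMAS AND PROOFS =====

-- B's scan with an explicit fallback value, the shape the induction relates to A's accumulator.
def altFrom (now : List Int) (todo : List (List Int)) (target : List Int) : List Int :=
  match (todo.takeWhile (fun t => !pyListLt (now.take 2) (t.take 2))).reverse.find?
      (fun t => pyListLt (t.take 3) (now.take 3)) with
  | some t => t
  | none => target

theorem altFrom_cons (now : List Int) (t : List Int) (rest : List (List Int)) (target : List Int) :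
    altFrom now (t :: rest) target =
      if pyListLt (now.take 2) (t.take 2) then target
      else altFrom now rest (if pyListLt (t.take 3) (now.take 3) then t else target) := by
  unfold altFrom
  by_cases hp : pyListLt (now.take 2) (t.take 2)
  · simp [hp]
  · simp only [List.takeWhile_cons, hp, Bool.not_false, if_true, List.reverse_cons,
      List.find?_append]
    cases hfind : (List.takeWhile (fun t => !pyListLt (now.take 2) (t.take 2)) rest).reverse.find?
        (fun t => pyListLt (t.take 3) (now.take 3)) with
    | some s => simp
    | none =>
      by_cases hq : pyListLt (t.take 3) (now.take 3) <;>
        simp [List.find?, hq]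

theorem pyGet1_cons (u v : Int) (l : List Int) : PySem.List.pyGet? (u :: v :: l) 1 = some v := by
  simp [PySem.List.pyGet?, PySem.List.pyIdx?]

theorem pyGet2_cons (u v w : Int) (l : List Int) : PySem.List.pyGet? (u :: v :: w :: l) 2 = some w := by
  simp only [PySem.List.pyGet?, PySem.List.pyIdx?]
  have h : (2:Int) ≤ (l.length : Int) + 1 + 1 := by omega
  simp [h]

theorem pre_cons (t : List Int) (rest : List (List Int)) (now : List Int)
    (h : Pre_last_task (t :: rest) now) :
    taskOkB now t = true ∧ (brkB now t = false → Pre_last_task rest now) := by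
  constructor
  · have := h 0 (by simp) (fun j hj => absurd hj (by omega))
    simpa using this
  · intro hb i hi hg
    have := h (i + 1) (by simpa using Nat.succ_lt_succ hi) ?_
    · simpa using this
    · intro j hj
      cases j with
      | zero => simpa using hb
      | succ j' => simpa using hg j' (by omega)

theorem go_eq_altFrom (now : List Int) :
    ∀ (todo : List (List Int)), Pre_last_task todo now →
      ∀ target, lastTaskGo now todo target = altFrom now todo target := by
  intro todo
  induction todo with
  | nil => intro _ target; rfl
  | cons t rest ih =>
    intro hpre target
    obtain ⟨hok, hrest⟩ := pre_cons t rest now hpre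
    cases t with
    | nil => simp [taskOkB] at hok
    | cons a ts =>
      cases now with
      | nil => simp [taskOkB] at hok
      | cons x ns =>
        rw [altFrom_cons]
        rcases lt_trichotomy a x with h0 | h0 | h0
        · -- task[0] < now[0]: target updates to the task, no break
          have hn : ¬ x < a := by omega
          have hb : brkB (x :: ns) (a :: ts) = false := by
            simp [brkB, pyListLt, List.take, h0, hn]
          simp only [lastTaskGo, PySem.List.pyGet?_zero_cons, Option.getD_some, gt_iff_lt]
          rw [if_pos h0, ih (hrest hb) (a :: ts)]
          simp [List.take, pyListLt, h0, hn]
        · -- task[0] == now[0]: the scan reads index 1, so taskOkB exposes it on both sides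
          subst h0
          cases ts with
          | nil => simp [taskOkB] at hok
          | cons b ts2 =>
            cases ns with
            | nil => simp [taskOkB] at hok
            | cons y ns2 =>
              simp only [lastTaskGo, PySem.List.pyGet?_zero_cons, pyGet1_cons,
                Option.getD_some, gt_iff_lt, lt_irrefl, if_false]
              rcases lt_trichotomy b y with h1 | h1 | h1
              · have hn : ¬ y < b := by omega
                have hb : brkB (a :: y :: ns2) (a :: b :: ts2) = false := by
                  simp [brkB, pyListLt, List.take, h1, hn]
                rw [if_pos h1, ih (hrest hb) (a :: b :: ts2)]
                simp [List.take, pyListLt, h1, hn]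
              · -- task[1] == now[1]: index 2 is read, taskOkB gives three components on both sides
                subst h1
                simp only [lt_irrefl, if_false]
                cases ts2 with
                | nil => simp [taskOkB] at hok
                | cons c ts3 =>
                  cases ns2 with
                  | nil => simp [taskOkB] at hok
                  | cons z ns3 =>
                    have hb : brkB (a :: b :: z :: ns3) (a :: b :: c :: ts3) = false := by
                      simp [brkB, pyListLt, List.take]
                    simp only [pyGet2_cons, Option.getD_some]
                    by_cases h2 : c < z
                    · rw [if_pos h2, ih (hrest hb) (a :: b :: c :: ts3)]
                      simp [List.take, pyListLt, h2]
                    · rw [if_neg h2, ih (hrest hb) target]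
                      simp [List.take, pyListLt, h2]
              · have hn : ¬ b < y := by omega
                rw [if_neg hn, if_pos h1]
                simp [List.take, pyListLt, h1]
        · -- task[0] > now[0]: break
          have hn : ¬ a < x := by omega
          simp only [lastTaskGo, PySem.List.pyGet?_zero_cons, Option.getD_some, gt_iff_lt]
          rw [if_neg hn, if_pos h0]
          simp [List.take, pyListLt, h0]

-- ===== VERDICT (by name: the statement is the Claim_ definition above) =====
theorem last_task_spec : Claim_equal_last_task := by
  intro todo now _ hpre
  unfold Spec_last_task last_task last_task_alt
  rw [go_eq_altFrom now todo hpre []]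
  rfl
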